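-- pv_equiv track=rewrite | github.com/muneebaifrah/Unstop-100-Days-Coding-Sprint | Day-34/4.Choose_Your_Syllabus.py | user_logic
-- ===== SOURCE A (Python) =====
-- import bisect
--
-- def user_logic(n, arr, b):
--     arr.sort()
--     b.sort()
--
--     interest1 = 0
--     interest2 = 0
--
--     for x in arr:
--         interest1 += bisect.bisect_right(b, x)
--
--     for x in b:
--         interest2 += bisect.bisect_right(arr, x)
--
--     return max(interest1, interest2)
-- ===== SOURCE B (Python) =====
-- def user_logic(n, arr, b):
--     # Same in-place sorting side effect as the original; then one linear
--     # two-pointer merge per direction instead of per-element binary search.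
--     arr.sort()
--     b.sort()
--
--     def sweep(xs, ys):
--         total = 0
--         j = 0
--         m = len(ys)
--         for x in xs:
--             while j < m and ys[j] <= x:
--                 j += 1
--             total += j
--         return total
--
--     return max(sweep(arr, b), sweep(b, arr))
-- ===== Notes on version B (the rewrite author's own statement) =====
-- stated objective: alternative
-- what changed: Replaces the per-element bisect_right binary searches with a single linear two-pointer merge over the two sorted arrays in each direction.
import Mathlib
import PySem

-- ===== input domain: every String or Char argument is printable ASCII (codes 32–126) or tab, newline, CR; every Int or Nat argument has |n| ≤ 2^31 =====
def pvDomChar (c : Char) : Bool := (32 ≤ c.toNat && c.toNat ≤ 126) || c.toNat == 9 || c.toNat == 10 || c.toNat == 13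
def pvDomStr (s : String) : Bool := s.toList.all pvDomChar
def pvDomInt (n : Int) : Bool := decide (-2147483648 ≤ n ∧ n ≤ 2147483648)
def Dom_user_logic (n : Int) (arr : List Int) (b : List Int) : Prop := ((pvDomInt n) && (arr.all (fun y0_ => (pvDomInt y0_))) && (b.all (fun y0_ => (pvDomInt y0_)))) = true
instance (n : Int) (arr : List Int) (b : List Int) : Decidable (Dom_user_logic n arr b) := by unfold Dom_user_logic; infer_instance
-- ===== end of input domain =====

-- B replaces A's per-element bisect_right binary searches with a linear two-pointer
-- merge over the two sorted lists (alternative decomposition; both sort their list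
-- arguments in place in Python — the equivalence proved is about the return value).


-- ===== PORT A =====
def user_logic (n : Int) (arr : List Int) (b : List Int) : Int :=
  let arr1 := PySem.List.sorted arr (fun x => x)
  let b1 := PySem.List.sorted b (fun x => x)
  let interest1 := arr1.foldl (fun acc x => acc + (PySem.List.bisectRight b1 x : Int)) 0
  let interest2 := b1.foldl (fun acc x => acc + (PySem.List.bisectRight arr1 x : Int)) 0
  max interest1 interest2

-- ===== PORT B =====
-- the two-pointer merge of Source B's `sweep`: j = #ys-elements already passed, acc = running total
def pvSweep : List Int → List Int → Int → Int → Int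
  | [], _, _, acc => acc
  | _ :: xs', [], j, acc => pvSweep xs' [] j (acc + j)
  | x :: xs', y :: ys', j, acc =>
      if y ≤ x then pvSweep (x :: xs') ys' (j + 1) acc
      else pvSweep xs' (y :: ys') j (acc + j)
termination_by xs ys => xs.length + ys.length

def user_logic_alt (n : Int) (arr : List Int) (b : List Int) : Int :=
  let arr1 := PySem.List.sorted arr (fun x => x)
  let b1 := PySem.List.sorted b (fun x => x)
  max (pvSweep arr1 b1 0 0) (pvSweep b1 arr1 0 0)

-- ===== PRECONDITION & SPEC =====
def Spec_user_logic (n : Int) (arr : List Int) (b : List Int) (out : Int) : Prop := out = user_logic_alt n arr b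
instance (n : Int) (arr : List Int) (b : List Int) (out : Int) : Decidable (Spec_user_logic n arr b out) := by unfold Spec_user_logic; infer_instance

-- ===== CLAIM (what is proved, stated in full; the proofs are below) =====
def Claim_equal_user_logic : Prop := ∀ (n : Int) (arr : List Int) (b : List Int), Dom_user_logic n arr b → Spec_user_logic n arr b (user_logic n arr b)

-- ===== LEMMAS AND PROOFS =====

-- on a sorted list, bisect_right x counts the elements ≤ x
theorem bisectRight_eq_countP (ys : List Int) (x : Int)
    (hs : ys.Pairwise (· ≤ ·)) :
    (PySem.List.bisectRight ys x : Nat) = ys.countP (fun y => decide (y ≤ x)) := by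
  obtain ⟨hk, hlt, hge⟩ := PySem.List.bisectRight_spec ys x hs
  set k := PySem.List.bisectRight ys x with hkdef
  have hsplit : ys = ys.take k ++ ys.drop k := (List.take_append_drop k ys).symm
  rw [hsplit, List.countP_append]
  have h1 : (ys.take k).countP (fun y => decide (y ≤ x)) = (ys.take k).length := by
    apply List.countP_eq_length.mpr
    intro a ha
    obtain ⟨j, hj, hja⟩ := List.mem_iff_getElem.mp ha
    have hjk : j < k := by
      have h := hj; simp [List.length_take] at h; omega
    have hjlen : j < ys.length := lt_of_lt_of_le hjk hk
    have : (ys.take k)[j] = ys[j] := List.getElem_take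
    simp [← hja, this, hlt j hjlen hjk]
  have h2 : (ys.drop k).countP (fun y => decide (y ≤ x)) = 0 := by
    apply List.countP_eq_zero.mpr
    intro a ha
    obtain ⟨j, hj, hja⟩ := List.mem_iff_getElem.mp ha
    have hjlen : k + j < ys.length := by
      have := hj; simp [List.length_drop] at this; omega
    have : (ys.drop k)[j] = ys[k + j] := by
      simp [List.getElem_drop]
    have hx : x < ys[k + j] := hge (k + j) hjlen (Nat.le_add_right k j)
    simp [← hja, this]
    omega
  rw [h1, h2, List.length_take]
  have := hk
  omega

theorem pvSweep_eq_sum (xs ys : List Int) (j acc : Int)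
    (hxs : xs.Pairwise (· ≤ ·)) (hys : ys.Pairwise (· ≤ ·)) :
    pvSweep xs ys j acc =
      acc + (xs.map (fun x => j + ((ys.countP (fun y => decide (y ≤ x)) : Nat) : Int))).sum := by
  induction xs, ys, j, acc using pvSweep.induct with
  | case1 ys j acc => simp [pvSweep]
  | case2 x xs' j acc ih =>
      rw [pvSweep, ih (List.Pairwise.of_cons hxs) hys]
      simp [List.countP]
      ring
  | case3 x xs' y ys' j acc hle ih =>
      rw [pvSweep, if_pos hle,
        ih hxs (List.Pairwise.of_cons hys)]
      congr 1
      congr 1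
      apply List.map_congr_left
      intro a ha
      have hya : y ≤ a := by
        rcases ha with _ | ha
        · exact hle
        · exact le_trans hle ((List.rel_of_pairwise_cons hxs) (by assumption))
      simp [hya]
      ring
  | case4 x xs' y ys' j acc hle ih =>
      rw [pvSweep, if_neg hle,
        ih (List.Pairwise.of_cons hxs) hys]
      have hx : ((y :: ys').countP (fun z => decide (z ≤ x))) = 0 := by
        apply List.countP_eq_zero.mpr
        intro a ha
        rcases ha with _ | ha
        · simp; omega
        · have : y ≤ a := (List.rel_of_pairwise_cons hys) (by assumption)
          simp; omega
      simp [hx]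
      ring

theorem foldl_add_eq_sum (f : Int → Int) (xs : List Int) (c : Int) :
    xs.foldl (fun acc x => acc + f x) c = c + (xs.map f).sum := by
  induction xs generalizing c with
  | nil => simp
  | cons x xs ih => simp [List.foldl, ih]; ring

theorem direction_eq (xs ys : List Int)
    (hxs : xs.Pairwise (· ≤ ·)) (hys : ys.Pairwise (· ≤ ·)) :
    xs.foldl (fun acc x => acc + (PySem.List.bisectRight ys x : Int)) 0 =
      pvSweep xs ys 0 0 := by
  rw [pvSweep_eq_sum xs ys 0 0 hxs hys, foldl_add_eq_sum]
  simp only [zero_add]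
  congr 1
  apply List.map_congr_left
  intro a _
  rw [bisectRight_eq_countP ys a hys]

-- ===== VERDICT (by name: the statement is the Claim_ definition above) =====
theorem user_logic_spec : Claim_equal_user_logic := by
  intro n arr b _
  unfold Spec_user_logic user_logic user_logic_alt
  have ha := PySem.List.sorted_pairwise arr (fun x => x)
  have hb := PySem.List.sorted_pairwise b (fun x => x)
  simp only
  rw [direction_eq _ _ ha hb, direction_eq _ _ hb ha]
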